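-- pv_equiv track=rewrite | github.com/Jassac97/Senior-Design | image_processing.py | remove_points_every_11
-- ===== SOURCE A (Python) =====
-- def remove_points_every_11(points):
--     sorted_points = sorted(points, key=lambda p: (p[1], p[0]))
--     result = []
--     # Iterate over the list in chunks of 11
--     for i in range(0, len(sorted_points), 11):
--         chunk = sorted_points[i:i + 11]
--         # Remove the 0th point and 10th point (if they exist)
--         filtered_chunk = [pt for j, pt in enumerate(chunk) if j != 0 and j != 10]
--         result.extend(filtered_chunk)
--     return result
-- ===== SOURCE B (Python) =====
-- def remove_points_every_11(points):
--     pts = sorted(points, key=lambda p: (p[1], p[0]))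
--     out = []
--     while len(pts) >= 11:
--         out += pts[1:10]
--         pts = pts[11:]
--     out += pts[1:]
--     return out
-- ===== Notes on version B (the rewrite author's own statement) =====
-- stated objective: alternative
-- what changed: Replaces A's index-driven loop (range stepping by 11 with an inner enumerate-and-filter comprehension testing j != 0 and j != 10) by an index-free while loop that repeatedly slices off out += pts[1:10]; pts = pts[11:] for each full block and appends pts[1:] of the final partial block.
import Mathlib
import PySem

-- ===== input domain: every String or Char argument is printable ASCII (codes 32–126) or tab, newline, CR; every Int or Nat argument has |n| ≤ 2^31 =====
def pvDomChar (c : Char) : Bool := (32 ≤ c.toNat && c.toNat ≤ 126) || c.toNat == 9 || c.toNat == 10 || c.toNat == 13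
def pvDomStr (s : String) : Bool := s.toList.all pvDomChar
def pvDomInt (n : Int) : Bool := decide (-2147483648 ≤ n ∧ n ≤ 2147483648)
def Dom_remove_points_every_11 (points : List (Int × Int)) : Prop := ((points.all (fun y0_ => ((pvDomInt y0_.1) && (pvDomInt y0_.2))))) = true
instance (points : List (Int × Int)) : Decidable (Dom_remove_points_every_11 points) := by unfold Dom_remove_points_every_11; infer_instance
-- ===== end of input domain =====

-- B replaces A's index-driven chunk loop (enumerate + j != 0/10 filter) by an index-free while loop slicing off pts[1:10] of each full block and appending pts[1:] of the final partial block (alternative decomposition, same cost).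


-- ===== PORT A =====
def remove_points_every_11 (points : List (Int × Int)) : List (Int × Int) :=
  let sorted_points := PySem.List.sorted2 points (fun p => p.2) (fun p => p.1) false
  let result : List (Int × Int) := []
  -- for i in range(0, len(sorted_points), 11): chunk = sorted_points[i:i+11]; result.extend([pt for j, pt in enumerate(chunk) if j != 0 and j != 10])
  (PySem.List.pyRange 0 (sorted_points.length : Int) 11).foldl
    (fun result i =>
      let chunk := PySem.List.slice sorted_points (some i) (some (i + 11))
      let filtered_chunk :=
        ((PySem.List.enumerate chunk 0).filter (fun jp => jp.1 != 0 && jp.1 != 10)).map (·.2)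
      result ++ filtered_chunk) result

-- ===== PORT B =====
/-- Source B's while loop: while len(pts) >= 11: out += pts[1:10]; pts = pts[11:]. Returns (out, pts). -/
def pvLoop (out pts : List (Int × Int)) : List (Int × Int) × List (Int × Int) :=
  if 11 ≤ pts.length then
    pvLoop (out ++ PySem.List.slice pts (some 1) (some 10)) (PySem.List.slice pts (some 11) none)
  else (out, pts)
termination_by pts.length
decreasing_by
  rw [PySem.List.slice_from _ (by omega)]
  simp only [List.length_drop]
  omega

def remove_points_every_11_alt (points : List (Int × Int)) : List (Int × Int) :=
  let pts := PySem.List.sorted2 points (fun p => p.2) (fun p => p.1) false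
  let s := pvLoop [] pts
  s.1 ++ PySem.List.slice s.2 (some 1) none

-- ===== PRECONDITION & SPEC =====
def Spec_remove_points_every_11 (points : List (Int × Int)) (out : List (Int × Int)) : Prop := out = remove_points_every_11_alt points
instance (points : List (Int × Int)) (out : List (Int × Int)) : Decidable (Spec_remove_points_every_11 points out) := by unfold Spec_remove_points_every_11; infer_instance

-- ===== CLAIM (what is proved, stated in full; the proofs are below) =====
def Claim_equal_remove_points_every_11 : Prop := ∀ (points : List (Int × Int)), Dom_remove_points_every_11 points → Spec_remove_points_every_11 points (remove_points_every_11 points)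

-- ===== LEMMAS AND PROOFS =====

/-- Recursive restatement of B's loop body: proof helper only. -/
def pvTrim (pts : List (Int × Int)) : List (Int × Int) :=
  if pts = [] then []
  else if 11 ≤ pts.length then
    PySem.List.slice pts (some 1) (some 10) ++ pvTrim (PySem.List.slice pts (some 11) none)
  else PySem.List.slice pts (some 1) none
termination_by pts.length
decreasing_by
  rw [PySem.List.slice_from _ (by omega)]
  simp only [List.length_drop]
  omega

/-- B's while loop computes out ++ pvTrim pts once the final pts[1:] is appended. -/
theorem pvLoop_trim (n : Nat) : ∀ (out pts : List (Int × Int)), pts.length ≤ n →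
    (pvLoop out pts).1 ++ PySem.List.slice (pvLoop out pts).2 (some 1) none
      = out ++ pvTrim pts := by
  induction n with
  | zero =>
    intro out pts h
    have : pts = [] := by cases pts <;> simp_all
    subst this
    rw [pvLoop, pvTrim]
    simp [PySem.List.slice_from _ (by omega : (0:Int) ≤ 1)]
  | succ n ih =>
    intro out pts h
    rw [pvLoop, pvTrim]
    by_cases h11 : 11 ≤ pts.length
    · have hnil : pts ≠ [] := by intro hc; subst hc; simp at h11
      rw [if_pos h11, if_neg hnil, if_pos h11]
      rw [ih _ _ (by rw [PySem.List.slice_from _ (by omega)]; simp; omega)]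
      rw [List.append_assoc]
    · rw [if_neg h11]
      by_cases hnil : pts = []
      · subst hnil
        simp [PySem.List.slice_from _ (by omega : (0:Int) ≤ 1)]
      · rw [if_neg hnil, if_neg h11]

/-- The filtered chunk A builds from one chunk of 11. -/
def pvMid (c : List (Int × Int)) : List (Int × Int) :=
  ((PySem.List.enumerate c 0).filter (fun jp => jp.1 != 0 && jp.1 != 10)).map (·.2)

/-- Chunked recursion both programs are shown to compute. -/
def pvG : Nat → List (Int × Int) → List (Int × Int)
  | 0, _ => []
  | q + 1, l => pvMid (l.take 11) ++ pvG q (l.drop 11)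

theorem pvG_nil (q : Nat) : pvG q [] = [] := by
  induction q with
  | zero => rfl
  | succ q ih => simp [pvG, pvMid, PySem.List.enumerate_nil, ih]

theorem pvA_eq_G (q : Nat) : ∀ (l : List (Int × Int)),
    (List.range q).flatMap (fun k => pvMid ((l.drop (11 * k)).take 11)) = pvG q l := by
  induction q with
  | zero => intro l; simp [pvG]
  | succ q ih =>
    intro l
    rw [List.range_succ_eq_map, List.flatMap_cons, List.flatMap_map]
    simp only [Nat.mul_zero, List.drop_zero, pvG]
    congr 1
    rw [← ih (l.drop 11)]
    apply List.flatMap_congr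
    intro k _
    rw [List.drop_drop]
    have h : 11 * Nat.succ k = 11 + 11 * k := by omega
    rw [h]

/-- A's fold equals the chunk recursion with ⌈len/11⌉ chunks. -/
theorem pvA_core (l : List (Int × Int)) :
    (PySem.List.pyRange 0 (l.length : Int) 11).foldl
      (fun result i =>
        let chunk := PySem.List.slice l (some i) (some (i + 11))
        let filtered_chunk :=
          ((PySem.List.enumerate chunk 0).filter (fun jp => jp.1 != 0 && jp.1 != 10)).map (·.2)
        result ++ filtered_chunk) []
    = pvG ((l.length + 10) / 11) l := by
  rw [PySem.List.foldl_append_eq_flatMap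
    (fun i => ((PySem.List.enumerate (PySem.List.slice l (some i) (some (i + 11))) 0).filter
      (fun jp => jp.1 != 0 && jp.1 != 10)).map (·.2))]
  rw [List.nil_append]
  have hrange : PySem.List.pyRange 0 (l.length : Int) 11
      = (List.range ((l.length + 10) / 11)).map (fun k => ((11 * k : Nat) : Int)) := by
    rw [PySem.List.pyRange_of_pos 0 (l.length : Int) (by omega)]
    have hq : (if (0 : Int) < (l.length : Int) then (((l.length : Int) - 0 + 11 - 1) / 11).toNat else 0)
        = (l.length + 10) / 11 := by
      by_cases h : (0 : Int) < (l.length : Int)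
      · simp only [h, if_pos]; omega
      · simp only [h, ite_false]; omega
    rw [hq]
    apply List.map_congr_left
    intro k _
    push_cast; ring
  rw [hrange, List.flatMap_map]
  have hA : (List.range ((l.length + 10) / 11)).flatMap
      (fun k => ((PySem.List.enumerate
          (PySem.List.slice l (some ((11 * k : Nat) : Int)) (some (((11 * k : Nat) : Int) + 11))) 0).filter
        (fun jp => jp.1 != 0 && jp.1 != 10)).map (·.2))
      = (List.range ((l.length + 10) / 11)).flatMap (fun k => pvMid ((l.drop (11 * k)).take 11)) := by
    apply List.flatMap_congr
    intro k _
    rw [show (((11 * k : Nat) : Int) + 11) = (((11 * k : Nat) : Int) + ((11 : Nat) : Int)) by norm_num]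
    rw [PySem.List.slice_natCast_add]
    rfl
  rw [hA, pvA_eq_G]

/-- All indices 1 ≤ k ≤ 9 survive the filter when the tail fits before index 10. -/
theorem pvMid_tail (xs : List (Int × Int)) : ∀ (k : Int), 1 ≤ k → k + xs.length ≤ 10 →
    ((PySem.List.enumerate xs k).filter (fun jp => jp.1 != 0 && jp.1 != 10)).map (·.2) = xs := by
  induction xs with
  | nil => intro k _ _; simp [PySem.List.enumerate_nil]
  | cons x xs ih =>
    intro k h1 h2
    rw [PySem.List.enumerate_cons, List.filter_cons]
    have hk : (k != 0 && k != 10) = true := by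
      simp only [bne_iff_ne, ne_eq, Bool.and_eq_true]
      simp only [List.length_cons] at h2
      constructor <;> omega
    rw [if_pos hk, List.map_cons, ih (k + 1) (by omega) (by simp at h2 ⊢; omega)]

/-- With exactly one more element than fits, the last (index-10) element is dropped. -/
theorem pvMid_tail_full (xs : List (Int × Int)) : ∀ (k : Int), 1 ≤ k → k + xs.length = 11 →
    ((PySem.List.enumerate xs k).filter (fun jp => jp.1 != 0 && jp.1 != 10)).map (·.2) = xs.dropLast := by
  induction xs with
  | nil => intro k _ _; simp [PySem.List.enumerate_nil]
  | cons x xs ih =>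
    intro k h1 h2
    simp only [List.length_cons] at h2
    rw [PySem.List.enumerate_cons, List.filter_cons]
    by_cases h10 : k = 10
    · have hxs : xs = [] := by cases xs with
        | nil => rfl
        | cons y ys => exfalso; simp at h2; omega
      subst hxs h10
      simp [PySem.List.enumerate_nil]
    · have hk : (k != 0 && k != 10) = true := by
        simp only [bne_iff_ne, ne_eq, Bool.and_eq_true]
        constructor <;> omega
      have hxs : xs ≠ [] := by
        intro h; subst h; simp at h2; omega
      rw [if_pos hk, List.map_cons, ih (k + 1) (by omega) (by omega),
        List.dropLast_cons_of_ne_nil hxs]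

theorem pvMid_small (c : List (Int × Int)) (h : c.length ≤ 10) : pvMid c = c.drop 1 := by
  cases c with
  | nil => simp [pvMid, PySem.List.enumerate_nil]
  | cons x xs =>
    unfold pvMid
    rw [PySem.List.enumerate_cons, List.filter_cons]
    simp only [show ((0 : Int) != 0 && (0 : Int) != 10) = false by decide, Bool.false_eq_true,
      ite_false]
    rw [zero_add] at *
    rw [pvMid_tail xs 1 (by omega) (by simp at h ⊢; omega)]
    simp

theorem pvMid_full (c : List (Int × Int)) (h : c.length = 11) : pvMid c = (c.drop 1).dropLast := by
  cases c with
  | nil => simp at h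
  | cons x xs =>
    unfold pvMid
    rw [PySem.List.enumerate_cons, List.filter_cons]
    simp only [show ((0 : Int) != 0 && (0 : Int) != 10) = false by decide, Bool.false_eq_true,
      ite_false]
    rw [zero_add] at *
    rw [pvMid_tail_full xs 1 (by omega) (by simp at h ⊢; omega)]
    simp

/-- B's recursion equals the chunk recursion whenever q chunks suffice. -/
theorem pvTrim_eq_G (q : Nat) : ∀ (l : List (Int × Int)), l.length ≤ 11 * q →
    pvTrim l = pvG q l := by
  induction q with
  | zero =>
    intro l hl
    have : l = [] := by cases l <;> simp_all
    subst this; rw [pvTrim]; simp [pvG]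
  | succ q ih =>
    intro l hl
    rw [pvTrim]
    by_cases hnil : l = []
    · subst hnil; simp [pvG_nil]
    · rw [if_neg hnil]
      by_cases h11 : 11 ≤ l.length
      · rw [if_pos h11]
        rw [PySem.List.slice_from _ (by omega), show Int.toNat 11 = 11 from rfl]
        have hs : PySem.List.slice l (some 1) (some 10) = (l.drop 1).take 9 := by
          rw [PySem.List.slice_toNat _ (by omega) (by omega)]; rfl
        rw [hs, ih (l.drop 11) (by simp; omega)]
        simp only [pvG]
        congr 1
        rw [pvMid_full (l.take 11) (by simp; omega)]
        rw [List.drop_take]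
        have hlen : ((l.drop 1).take (11 - 1)).length = 10 := by simp; omega
        rw [List.dropLast_eq_take, hlen]
        norm_num [List.take_take]
        
      · rw [if_neg h11]
        rw [PySem.List.slice_from _ (by omega), show Int.toNat 1 = 1 from rfl]
        simp only [pvG]
        rw [pvMid_small (l.take 11) (by simp; omega)]
        have hd : l.drop 11 = [] := by rw [List.drop_eq_nil_iff]; omega
        rw [hd, pvG_nil, List.append_nil, List.take_of_length_le (by omega)]

-- ===== VERDICT (by name: the statement is the Claim_ definition above) =====
theorem remove_points_every_11_spec : Claim_equal_remove_points_every_11 := by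
  intro points _
  unfold Spec_remove_points_every_11 remove_points_every_11 remove_points_every_11_alt
  set l := PySem.List.sorted2 points (fun p => p.2) (fun p => p.1) false with hl
  rw [pvA_core l]
  rw [show (let s := pvLoop [] l; s.1 ++ PySem.List.slice s.2 (some 1) none)
        = (pvLoop [] l).1 ++ PySem.List.slice (pvLoop [] l).2 (some 1) none from rfl]
  rw [pvLoop_trim l.length [] l (by omega), List.nil_append,
    pvTrim_eq_G ((l.length + 10) / 11) l (by omega)]
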